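-- pv_equiv track=rewrite | github.com/AcideFluorhydrique/Introduction-to-Computer-Programing-NYUSH-2023Fall | 复习10/final.py | new_function
-- ===== SOURCE A (Python) =====
-- def new_function(an_int):
--
--     result = ""
--
--     for i in range(an_int):
--
--         x = " " * (an_int - i - 1) + "*" * (i * 2 + 1) + "\n"
--
--         result += x
--
--     for i in range(an_int - 2, -1, -1):
--
--         x = " " * (an_int - i - 1) + "*" * (i * 2 + 1) + "\n"
--
--         result += x
--
--     return result
-- ===== SOURCE B (Python) =====
-- def new_function(an_int):
--     rows = []
--     for r in range(2 * an_int - 1):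
--         level = an_int - 1 - abs(r - (an_int - 1))
--         rows.append(" " * (an_int - level - 1) + "*" * (2 * level + 1) + "\n")
--     return "".join(rows)
-- ===== Notes on version B (the rewrite author's own statement) =====
-- stated objective: alternative
-- what changed: Replaces A's two directional loops with string concatenation by a single loop over all 2n-1 rows computing the star level from abs(r-(n-1)), collected in a list and joined once.
import Mathlib
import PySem

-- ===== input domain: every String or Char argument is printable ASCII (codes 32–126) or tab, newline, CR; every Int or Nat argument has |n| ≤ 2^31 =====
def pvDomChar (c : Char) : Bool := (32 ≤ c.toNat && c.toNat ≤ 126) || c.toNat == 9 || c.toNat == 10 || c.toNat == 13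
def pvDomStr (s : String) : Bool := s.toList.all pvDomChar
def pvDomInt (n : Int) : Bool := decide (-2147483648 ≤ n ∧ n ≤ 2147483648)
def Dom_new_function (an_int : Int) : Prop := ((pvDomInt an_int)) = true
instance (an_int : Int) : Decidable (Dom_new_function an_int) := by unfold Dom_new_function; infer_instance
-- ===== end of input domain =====

-- B replaces A's two directional concatenation loops by one loop over all 2n-1 rows,
-- computing each row's star level from abs(r-(n-1)) and joining the row list once.


-- ===== PORT A =====
-- row built in A's loop body: " "*(an_int-i-1) + "*"*(i*2+1) + "\n"  (on chars; Python's
-- negative string multiplier gives "", matched by Int.toNat clamping)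
def pvRowA (an_int i : Int) : List Char :=
  List.replicate (an_int - i - 1).toNat ' ' ++ List.replicate (i * 2 + 1).toNat '*' ++ ['\n']

def new_function (an_int : Int) : String :=
  let r1 := (PySem.List.pyRange 0 an_int 1).foldl (fun acc i => acc ++ pvRowA an_int i) []
  let r2 := (PySem.List.pyRange (an_int - 2) (-1) (-1)).foldl (fun acc i => acc ++ pvRowA an_int i) r1
  String.mk r2

-- ===== PORT B =====
-- row appended in B's loop: " "*(an_int-level-1) + "*"*(2*level+1) + "\n"
def pvRowB (an_int level : Int) : List Char :=
  List.replicate (an_int - level - 1).toNat ' ' ++ List.replicate (2 * level + 1).toNat '*' ++ ['\n']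

def new_function_alt (an_int : Int) : String :=
  let rows := (PySem.List.pyRange 0 (2 * an_int - 1) 1).map
    (fun r => pvRowB an_int (an_int - 1 - |r - (an_int - 1)|))
  String.mk (PySem.Chars.join [] rows)

-- ===== PRECONDITION & SPEC =====
def Spec_new_function (an_int : Int) (out : String) : Prop := out = new_function_alt an_int
instance (an_int : Int) (out : String) : Decidable (Spec_new_function an_int out) := by unfold Spec_new_function; infer_instance

-- ===== CLAIM (what is proved, stated in full; the proofs are below) =====
def Claim_equal_new_function : Prop := ∀ (an_int : Int), Dom_new_function an_int → Spec_new_function an_int (new_function an_int)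

-- ===== LEMMAS AND PROOFS =====

theorem pv_join_nil_flatten (l : List (List Char)) : PySem.Chars.join [] l = l.flatten := by
  show List.intercalate [] l = l.flatten
  induction l with
  | nil => rfl
  | cons x xs ih =>
    cases xs with
    | nil => simp [List.intercalate]
    | cons y ys =>
      rw [List.flatten, ← ih]
      simp [List.intercalate, List.intersperse]

theorem pv_foldl_append {α : Type} (f : Int → List α) (l : List Int) (acc : List α) :
    l.foldl (fun a i => a ++ f i) acc = acc ++ (l.map f).flatten := by
  induction l generalizing acc with
  | nil => simp
  | cons x xs ih => simp [ih, List.append_assoc]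

theorem pvRowA_eq_rowB (n i : Int) : pvRowA n i = pvRowB n i := by
  unfold pvRowA pvRowB; rw [Int.mul_comm]

-- ===== VERDICT (by name: the statement is the Claim_ definition above) =====
theorem new_function_spec : Claim_equal_new_function := by
  intro n _
  show new_function n = new_function_alt n
  unfold new_function new_function_alt
  simp only [pv_join_nil_flatten, pv_foldl_append, List.nil_append]
  by_cases hn : n ≤ 0
  · rw [PySem.List.pyRange_one_eq_nil (by omega),
        PySem.List.pyRange_one_eq_nil (by omega),
        PySem.List.pyRange_neg_one_eq_nil (by omega)]
    simp
  · rw [PySem.List.pyRange_one_append 0 n (2 * n - 1) (by omega) (by omega)]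
    simp only [List.map_append, List.flatten_append]
    refine congrArg String.mk (congrArg₂ (fun a b : List Char => a ++ b) ?_ ?_)
    · -- top half: level r = r on [0, n)
      apply congrArg List.flatten
      apply List.map_congr_left
      intro r hr
      rw [PySem.List.mem_pyRange_one] at hr
      rw [pvRowA_eq_rowB]
      congr 1
      have : |r - (n - 1)| = n - 1 - r := by rw [abs_of_nonpos (by omega)]; ring
      omega
    · -- bottom half
      apply congrArg List.flatten
      rw [PySem.List.pyRange_one, PySem.List.pyRange_neg_one]
      have hlen : (2 * n - 1 - n).toNat = (n - 2 - -1).toNat := by omega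
      rw [hlen]
      simp only [List.map_map]
      apply List.map_congr_left
      intro k hk
      rw [List.mem_range] at hk
      simp only [Function.comp]
      rw [pvRowA_eq_rowB]
      congr 1
      have : |n + (k : Int) - (n - 1)| = (k : Int) + 1 := by rw [abs_of_nonneg (by omega)]; ring
      omega
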